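-- pv_equiv track=rewrite | github.com/Hyeonjunnn/CodingTest | 프로그래머스/1/133502. 햄버거 만들기/햄버거 만들기.py | solution
-- ===== SOURCE A (Python) =====
-- def solution(ingredient):
--     answer = 0
--
--     dq = []
--     for i in ingredient:
--         dq.append(i)
--
--         if (len(dq) >= 4 and dq[-4:] == [1,2,3,1]):
--             dq.pop()
--             dq.pop()
--             dq.pop()
--             dq.pop()
--
--             answer += 1
--
--     return answer
-- ===== SOURCE B (Python) =====
-- def solution(ingredient):
--     lst = list(ingredient)
--     answer = 0
--     while True:
--         for i in range(len(lst) - 3):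
--             if lst[i:i+4] == [1, 2, 3, 1]:
--                 del lst[i:i+4]
--                 answer += 1
--                 break
--         else:
--             return answer
-- ===== Notes on version B (the rewrite author's own statement) =====
-- stated objective: alternative
-- what changed: Replaces the streaming push/pop stack with repeated leftmost scan-and-remove of the contiguous pattern [1,2,3,1] on a working copy until none remains.
import Mathlib
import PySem

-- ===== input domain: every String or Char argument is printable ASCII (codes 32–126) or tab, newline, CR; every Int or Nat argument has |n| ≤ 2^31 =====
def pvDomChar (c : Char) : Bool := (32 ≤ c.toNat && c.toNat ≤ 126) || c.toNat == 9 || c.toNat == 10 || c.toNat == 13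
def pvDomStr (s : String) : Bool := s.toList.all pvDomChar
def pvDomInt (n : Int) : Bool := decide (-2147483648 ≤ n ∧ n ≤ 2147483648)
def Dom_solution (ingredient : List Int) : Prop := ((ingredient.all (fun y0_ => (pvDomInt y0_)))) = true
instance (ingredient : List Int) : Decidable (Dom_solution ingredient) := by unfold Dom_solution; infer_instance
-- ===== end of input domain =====

-- B replaces A's streaming push/pop stack by repeated leftmost scan-and-remove of [1,2,3,1] on a copy (alternative decomposition, not faster); neither version mutates the argument's observable value here (A's dq is local, B works on a copy).

-- ===== PORT A =====
-- state = (answer, dq); each step appends i, and if len(dq) >= 4 and dq[-4:] == [1,2,3,1] pops four times and counts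
def solutionStep (s : Int × List Int) (i : Int) : Int × List Int :=
  let dq := s.2 ++ [i]
  if 4 ≤ dq.length ∧ PySem.List.slice dq (some (-4)) none = [1, 2, 3, 1] then
    (s.1 + 1, dq.dropLast.dropLast.dropLast.dropLast)
  else
    (s.1, dq)

def solution (ingredient : List Int) : Int :=
  (ingredient.foldl solutionStep (0, [])).1

-- ===== PORT B =====
-- inner for-loop of Source B: scan for the first i with lst[i:i+4] == [1,2,3,1]; returns (prefix before the match, suffix after it)
def findSplit : List Int → Option (List Int × List Int)
  | [] => none
  | x :: xs =>
    if (x :: xs).take 4 = [1, 2, 3, 1] then some ([], (x :: xs).drop 4)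
    else (findSplit xs).map fun p => (x :: p.1, p.2)

theorem findSplit_length {l : List Int} {p : List Int × List Int}
    (h : findSplit l = some p) : (p.1 ++ p.2).length < l.length := by
  induction l generalizing p with
  | nil => simp [findSplit] at h
  | cons x xs ih =>
    rw [findSplit] at h
    split at h
    · cases h
      simp [List.length_drop]
    · cases hf : findSplit xs with
      | none => simp [hf] at h
      | some q =>
        simp [hf] at h
        have := ih hf
        cases h
        simp [List.length_append] at this ⊢
        omega

-- outer while-loop of Source B: remove the found occurrence, count, rescan
def solution_alt (ingredient : List Int) : Int :=
  match h : findSplit ingredient with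
  | some p => 1 + solution_alt (p.1 ++ p.2)
  | none => 0
termination_by ingredient.length
decreasing_by exact findSplit_length h

-- ===== PRECONDITION & SPEC =====
def Spec_solution (ingredient : List Int) (out : Int) : Prop := out = solution_alt ingredient
instance (ingredient : List Int) (out : Int) : Decidable (Spec_solution ingredient out) := by unfold Spec_solution; infer_instance

-- ===== CLAIM (what is proved, stated in full; the proofs are below) =====
def Claim_equal_solution : Prop := ∀ (ingredient : List Int), Dom_solution ingredient → Spec_solution ingredient (solution ingredient)

-- ===== LEMMAS AND PROOFS =====

-- the pattern
def pvPat : List Int := [1, 2, 3, 1]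

theorem solution_alt_none {l : List Int} (h : findSplit l = none) : solution_alt l = 0 := by
  rw [solution_alt.eq_def, h]

theorem solution_alt_some {l u v : List Int} (h : findSplit l = some (u, v)) :
    solution_alt l = 1 + solution_alt (u ++ v) := by
  rw [solution_alt.eq_def, h]

-- findSplit finds nothing when the pattern is not an infix
theorem findSplit_none {l : List Int} (h : ¬ pvPat <:+: l) : findSplit l = none := by
  induction l with
  | nil => rfl
  | cons x xs ih =>
    rw [findSplit]
    split
    · rename_i ht
      exact absurd ⟨[], (x :: xs).drop 4, by
        show pvPat ++ _ = _
        rw [pvPat, ← ht, List.take_append_drop]⟩ h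
    · rw [ih fun hi => h (hi.trans (List.suffix_cons x xs).isInfix)]
      rfl

-- findSplit at the leftmost occurrence
theorem findSplit_eq {u : List Int} (v : List Int) (h : ¬ pvPat <:+: (u ++ [1, 2, 3])) :
    findSplit (u ++ pvPat ++ v) = some (u, v) := by
  induction u with
  | nil => simp [pvPat, findSplit]
  | cons x u ih =>
    simp only [List.cons_append]
    rw [findSplit]
    split
    · rename_i ht
      exfalso
      apply h
      have hcat : (x :: (u ++ [1, 2, 3])) ++ 1 :: v = x :: (u ++ pvPat ++ v) := by
        simp [pvPat]
      have key : (x :: (u ++ [1, 2, 3])).take 4 = [1, 2, 3, 1] := by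
        rw [← List.take_append_of_le_length (l₂ := 1 :: v) (by simp), hcat, ht]
      refine ⟨[], (x :: (u ++ [1, 2, 3])).drop 4, ?_⟩
      have : pvPat ++ (x :: (u ++ [1, 2, 3])).drop 4 = x :: (u ++ [1, 2, 3]) := by
        conv_lhs => rw [show pvPat = (x :: (u ++ [1, 2, 3])).take 4 from key.symm]
        rw [List.take_append_drop]
      simpa using this
    · have hx : ¬ pvPat <:+: (u ++ [1, 2, 3]) := fun hi => h (hi.trans (List.suffix_cons x _).isInfix)
      rw [ih hx]
      rfl

-- an infix of dq ++ [x] is a suffix of dq ++ [x] or an infix of dq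
theorem infix_concat {p dq : List Int} {x : Int} (h : p <:+: dq ++ [x]) :
    p <:+ dq ++ [x] ∨ p <:+: dq := by
  obtain ⟨s, t, hst⟩ := h
  rcases t.eq_nil_or_concat with rfl | ⟨t₀, y, rfl⟩
  · exact Or.inl ⟨s, by simpa using hst⟩
  · right
    have h1 : (s ++ p ++ t₀) ++ [y] = dq ++ [x] := by simpa [List.concat_eq_append] using hst
    exact ⟨s, t₀, (List.append_inj' h1 rfl).1⟩

-- the branch test of A is exactly "dq' ends with the pattern"
theorem cond_iff (dq' : List Int) :
    (4 ≤ dq'.length ∧ PySem.List.slice dq' (some (-4)) none = [1, 2, 3, 1]) ↔ pvPat <:+ dq' := by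
  constructor
  · rintro ⟨hl, hs⟩
    rw [PySem.List.slice_from_neg_ofNat dq' 4 (by omega)] at hs
    refine ⟨dq'.take (dq'.length - 4), ?_⟩
    show _ ++ pvPat = _
    rw [pvPat, ← hs, List.take_append_drop]
  · rintro ⟨u, rfl⟩
    have hlen : 4 ≤ (u ++ pvPat).length := by simp [pvPat]
    refine ⟨hlen, ?_⟩
    rw [PySem.List.slice_from_neg_ofNat _ 4 (by omega)]
    have h1 : (u ++ pvPat).length - 4 = u.length := by simp [pvPat]
    rw [h1, List.drop_left]
    rfl

-- main loop invariant: starting from a stack with no pattern infix,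
-- A's fold computes the accumulator plus B's count of (stack ++ rest)
theorem run_eq (rest : List Int) : ∀ (dq : List Int) (a : Int), ¬ pvPat <:+: dq →
    (rest.foldl solutionStep (a, dq)).1 = a + solution_alt (dq ++ rest) := by
  induction rest with
  | nil =>
    intro dq a h
    simp [solution_alt_none (findSplit_none h)]
  | cons x rest ih =>
    intro dq a h
    rw [List.foldl_cons]
    by_cases hc : 4 ≤ (dq ++ [x]).length ∧
        PySem.List.slice (dq ++ [x]) (some (-4)) none = [1, 2, 3, 1]
    · obtain ⟨u, hu⟩ := (cond_iff (dq ++ [x])).mp hc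
      rw [pvPat] at hu
      have hu' : dq ++ [x] = (u ++ [1, 2, 3]) ++ [1] := by rw [← hu]; simp
      obtain ⟨hdq, hx⟩ := List.append_inj' hu' rfl
      have hxx : x = 1 := by simpa using hx
      have hdrop : (dq ++ [x]).dropLast.dropLast.dropLast.dropLast = u := by
        rw [hu']
        rw [List.dropLast_concat]
        rw [show u ++ [1, 2, 3] = (u ++ [1, 2]) ++ [3] by simp, List.dropLast_concat]
        rw [show u ++ [1, 2] = (u ++ [1]) ++ [2] by simp, List.dropLast_concat]
        rw [List.dropLast_concat]
      have hstep : solutionStep (a, dq) x = (a + 1, u) := by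
        simp only [solutionStep]
        rw [if_pos hc, hdrop]
      rw [hstep]
      have hinfu : ¬ pvPat <:+: u := by
        intro hi
        apply h
        rw [hdq]
        exact hi.trans (List.prefix_append u [1, 2, 3]).isInfix
      rw [ih u (a + 1) hinfu]
      have hsplit : dq ++ x :: rest = u ++ pvPat ++ rest := by
        rw [hdq, hxx, pvPat]
        simp
      rw [hsplit, solution_alt_some (findSplit_eq rest (hdq ▸ h))]
      ring
    · have hstep : solutionStep (a, dq) x = (a, dq ++ [x]) := by
        simp only [solutionStep]
        rw [if_neg hc]
      rw [hstep]
      have hinf : ¬ pvPat <:+: dq ++ [x] := by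
        intro hi
        rcases infix_concat hi with hs | hi'
        · exact hc ((cond_iff _).mpr hs)
        · exact h hi'
      rw [ih (dq ++ [x]) a hinf]
      simp

-- ===== VERDICT (by name: the statement is the Claim_ definition above) =====
theorem solution_spec : Claim_equal_solution := by
  intro ingredient _
  show solution ingredient = solution_alt ingredient
  rw [solution]
  have := run_eq ingredient [] 0 (by rintro ⟨s, t, h⟩; simp [pvPat] at h)
  simpa using this
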